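-- pv_equiv track=rewrite | github.com/yeahzizi/algorithm | 백준/코딩테스트 대비를 위한 백준 문제 추천 문제집/silver/BOJ. 3085. 사탕게임.py | check
-- ===== SOURCE A (Python) =====
-- def check(arr):
--     n = len(arr)
--     answer = 1
--     for i in range(n):
--         cnt = 1
--         #행 확인
--         for j in range(1, n):
--             if arr[i][j-1] == arr[i][j]:
--                 cnt += 1
--             else:
--                 cnt = 1
--
--             if answer < cnt:
--                 answer = cnt
--
--         #열 확인
--         cnt = 1
--         for j in range(1, n):
--             if arr[j-1][i] == arr[j][i]:
--                 cnt += 1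
--             else:
--                 cnt = 1
--             if answer < cnt:
--                 answer = cnt
--
--     return answer
-- ===== SOURCE B (Python) =====
-- def check(arr):
--     n = len(arr)
--     def max_run(line):
--         if not line:
--             return 0
--         i = 1
--         while i < len(line) and line[i] == line[0]:
--             i += 1
--         return max(i, max_run(line[i:]))
--     if n <= 1:
--         return 1             # a board with at most one row has no adjacent pair; the answer is 1
--     grid = [row[:n] for row in arr]            # the candy board is the n-by-n top-left square
--     cols = [[row[i] for row in grid] for i in range(n)]
--     return max([1] + [max_run(line) for line in grid + cols])
-- ===== Notes on version B (the rewrite author's own statement) =====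
-- stated objective: simpler
-- what changed: B returns 1 outright for boards with at most one row (no adjacent pair exists), and otherwise replaces A's interleaved index loops with running counters by: clamp to the n-by-n board, transpose it, and for each line (rows ++ columns) compute the longest run by recursive first-run decomposition (strip the leading run, recurse on the rest), returning the max.
import Mathlib
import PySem

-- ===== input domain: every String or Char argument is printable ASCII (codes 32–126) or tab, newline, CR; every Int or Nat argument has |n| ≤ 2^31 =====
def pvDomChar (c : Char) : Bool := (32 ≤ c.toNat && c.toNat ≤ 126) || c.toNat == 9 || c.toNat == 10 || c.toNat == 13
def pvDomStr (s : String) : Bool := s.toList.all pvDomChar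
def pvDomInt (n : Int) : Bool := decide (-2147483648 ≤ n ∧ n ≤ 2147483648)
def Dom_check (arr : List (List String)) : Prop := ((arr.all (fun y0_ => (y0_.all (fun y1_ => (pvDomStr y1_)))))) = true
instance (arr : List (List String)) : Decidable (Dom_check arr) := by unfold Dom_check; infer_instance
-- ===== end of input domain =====

-- B computes the same answer by a different decomposition: answer 1 outright for boards
-- with at most one row, else clamp to the n-by-n board, transpose it, and for each line
-- (rows ++ columns) take the longest run by recursive first-run stripping; same cost.

-- ===== PORT A =====
-- pyCell arr i j = arr[i][j]; in-range under Pre_check, so the IndexError case cannot occur.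
def pyCell (arr : List (List String)) (i j : Int) : String :=
  PySem.List.pyGetD (PySem.List.pyGetD arr i []) j ""

-- the loop body 'cnt update; answer update' of A, factored (same statements, same order)
def stepA (st : Int × Int) (a b : String) : Int × Int :=
  let cnt := if a == b then st.2 + 1 else 1
  (if st.1 < cnt then cnt else st.1, cnt)

def check (arr : List (List String)) : Int :=
  let n : Int := arr.length
  (PySem.List.pyRange 0 n 1).foldl (fun answer i =>
    -- 행 확인 (row i)
    let st1 := (PySem.List.pyRange 1 n 1).foldl
      (fun (st : Int × Int) j => stepA st (pyCell arr i (j-1)) (pyCell arr i j)) (answer, 1)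
    -- 열 확인 (column i)
    let st2 := (PySem.List.pyRange 1 n 1).foldl
      (fun (st : Int × Int) j => stepA st (pyCell arr (j-1) i) (pyCell arr j i)) (st1.1, 1)
    st2.1) 1

-- ===== PORT B =====
-- runLen x ys = the while loop of Source B: how many leading elements of ys equal x
def runLen (x : String) : List String → Nat
  | [] => 0
  | y :: ys => if y == x then 1 + runLen x ys else 0

def maxRunAlt : List String → Int
  | [] => 0
  | x :: rest =>
    let k := runLen x rest
    max ((1 + k : Nat) : Int) (maxRunAlt (rest.drop k))
termination_by xs => xs.length
decreasing_by simp

def check_alt (arr : List (List String)) : Int :=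
  let n : Int := arr.length
  if arr.length ≤ 1 then 1  -- a board with at most one row has no adjacent pair
  else
    let grid := arr.map (fun row => PySem.List.slice row none (some n))  -- row[:n]
    -- [[row[i] for row in grid] for i in range(n)]; row[i] is in range under Pre_check
    let cols := (PySem.List.pyRange 0 n 1).map (fun i => grid.map (fun row => PySem.List.pyGetD row i ""))
    (((grid ++ cols).map maxRunAlt).foldl max 1)

-- ===== PRECONDITION & SPEC =====
-- Pre_ admits exactly the inputs on which A returns: the single-row/empty grids (A's loops
-- touch no element and it returns 1) and the grids whose every row has length ≥ len(arr);
-- on the excluded grids (≥ 2 rows, some row shorter than len(arr)) A raises IndexError.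
def Pre_check (arr : List (List String)) : Prop :=
  arr.length ≤ 1 ∨ ∀ row ∈ arr, arr.length ≤ row.length
instance (arr : List (List String)) : Decidable (Pre_check arr) := by unfold Pre_check; infer_instance

def pvWitness_check : List (List String) := [["a", "b"], ["b", "b"]]

def Spec_check (arr : List (List String)) (out : Int) : Prop := out = check_alt arr
instance (arr : List (List String)) (out : Int) : Decidable (Spec_check arr out) := by unfold Spec_check; infer_instance

-- ===== CLAIM (what is proved, stated in full; the proofs are below) =====
def Claim_equal_check : Prop := ∀ (arr : List (List String)), Dom_check arr → Pre_check arr → Spec_check arr (check arr)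

-- ===== LEMMAS AND PROOFS =====

-- fold of A's step over the adjacent pairs of a line
def pairsFold (xs : List String) (st : Int × Int) : Int × Int :=
  (xs.zip xs.tail).foldl (fun st p => stepA st p.1 p.2) st

-- the answer A's inner loop extracts from one line, started fresh
def lineVal (xs : List String) : Int := (pairsFold xs (1, 1)).1

theorem if_lt_eq_max (x y : Int) : (if x < y then y else x) = max x y := by
  by_cases h : x < y <;> simp [h] <;> omega

-- L1nat: index-driven adjacent fold = fold over zipped pairs
theorem foldl_adj_range (xs : List String) (st : Int × Int) :
    (List.range (xs.length - 1)).foldl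
      (fun st k => stepA st (xs.getD k "") (xs.getD (k+1) "")) st
    = pairsFold xs st := by
  induction xs generalizing st with
  | nil => simp [pairsFold]
  | cons x rest ih =>
    cases rest with
    | nil => simp [pairsFold]
    | cons y t =>
      have hlen : (x :: y :: t).length - 1 = t.length + 1 := by simp
      rw [hlen, List.range_succ_eq_map]
      simp only [List.foldl_cons, List.foldl_map, List.getD_cons_zero, List.getD_cons_succ,
        Nat.succ_eq_add_one]
      have := ih (stepA st x y)
      simp only [List.length_cons, Nat.add_sub_cancel, pairsFold, List.zip_cons_cons,
        List.tail_cons, List.foldl_cons] at this ⊢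
      exact this

-- L1: A's pyRange inner loop with any in-range access function = pairsFold
theorem foldl_pyRange_adj (xs : List String) (f : Int → String) (st : Int × Int)
    (hf : ∀ k : Nat, k < xs.length → f k = xs.getD k "") :
    (PySem.List.pyRange 1 (xs.length : Int) 1).foldl
      (fun st j => stepA st (f (j-1)) (f j)) st
    = pairsFold xs st := by
  rw [PySem.List.pyRange_one]
  have htn : ((xs.length : Int) - 1).toNat = xs.length - 1 := by omega
  rw [htn, List.foldl_map]
  have hext := List.foldl_ext
    (fun (st : Int × Int) (k : Nat) => stepA st (f (1 + (k : Int) - 1)) (f (1 + (k : Int))))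
    (fun (st : Int × Int) (k : Nat) => stepA st (xs.getD k "") (xs.getD (k+1) ""))
    st (l := List.range (xs.length - 1))
    (by
      intro st k hk
      rw [List.mem_range] at hk
      have h1 : (1 + (k : Int) - 1) = ((k : Nat) : Int) := by ring
      have h2 : (1 + (k : Int)) = (((k + 1 : Nat)) : Int) := by push_cast; ring
      dsimp only
      rw [h1, h2, hf k (by omega), hf (k+1) (by omega)])
  rw [hext]
  exact foldl_adj_range xs st

-- L2: the answer component splits off a max
theorem pairsFoldl_max_split (ps : List (String × String)) (a b c : Int) :
    (ps.foldl (fun st p => stepA st p.1 p.2) (max a b, c)).1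
    = max a ((ps.foldl (fun st p => stepA st p.1 p.2) (b, c)).1) := by
  induction ps generalizing a b c with
  | nil => simp
  | cons p t ih =>
    have hstep : ∀ (x d : Int), stepA (x, d) p.1 p.2
        = (max x (if p.1 == p.2 then d + 1 else 1), if p.1 == p.2 then d + 1 else 1) := by
      intro x d; simp [stepA, if_lt_eq_max]
    simp only [List.foldl_cons, hstep, max_assoc]
    exact ih a _ _

-- L3: first-run decomposition of pairsFold
theorem pairsFold_cons (x : String) (rest : List String) (a c : Int)
    (h1 : 1 ≤ c) (h2 : c ≤ a) :
    pairsFold (x :: rest) (a, c)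
    = (if rest.drop (runLen x rest) = []
       then (max a (c + (runLen x rest : Int)), c + (runLen x rest : Int))
       else pairsFold (rest.drop (runLen x rest)) (max a (c + (runLen x rest : Int)), 1)) := by
  induction rest generalizing x a c with
  | nil =>
    simp only [runLen, List.drop_nil, pairsFold, List.tail_cons, List.zip_nil_right,
      List.foldl_nil, Nat.cast_zero, add_zero, if_true]
    rw [max_eq_left h2]
  | cons y r ih =>
    by_cases hxy : y = x
    · subst hxy
      have hrun : runLen y (y :: r) = 1 + runLen y r := by simp [runLen]
      have hstep : stepA (a, c) y y = (max a (c + 1), c + 1) := by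
        simp only [stepA, BEq.rfl, if_true]
        rw [if_lt_eq_max]
      have hfold : pairsFold (y :: y :: r) (a, c) = pairsFold (y :: r) (max a (c + 1), c + 1) := by
        simp only [pairsFold, List.tail_cons, List.zip_cons_cons, List.foldl_cons, hstep]
      rw [hfold, ih y (max a (c + 1)) (c + 1) (by omega) (le_max_right _ _), hrun]
      have hdrop : (y :: r).drop (1 + runLen y r) = r.drop (runLen y r) := by
        rw [Nat.add_comm]; simp [List.drop_succ_cons]
      have hmax : max (max a (c + 1)) (c + 1 + (runLen y r : Int))
          = max a (c + ((1 + runLen y r : Nat) : Int)) := by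
        push_cast
        rw [max_assoc, max_eq_right (by omega : (c+1 : Int) ≤ c + 1 + (runLen y r : Int))]
        ring_nf
      have harith : (c + 1) + (runLen y r : Int) = c + ((1 + runLen y r : Nat) : Int) := by
        push_cast; ring
      rw [hdrop, hmax, harith]
    · have hbeq : (y == x) = false := by simp [hxy]
      have hrun : runLen x (y :: r) = 0 := by simp [runLen, hbeq]
      have hbeq' : (x == y) = false := by simp [Ne.symm hxy]
      have hstep : stepA (a, c) x y = (a, 1) := by
        simp only [stepA, hbeq', Bool.false_eq_true, if_false, if_lt_eq_max]
        rw [max_eq_left (by omega)]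
      have hfold : pairsFold (x :: y :: r) (a, c) = pairsFold (y :: r) (a, 1) := by
        simp only [pairsFold, List.tail_cons, List.zip_cons_cons, List.foldl_cons, hstep]
      rw [hfold, hrun]
      simp only [List.drop_zero, Nat.cast_zero, add_zero, reduceCtorEq, if_false]
      rw [max_eq_left h2]

-- L4: B's per-line value = A's per-line value
theorem maxRunAlt_eq_lineVal (xs : List String) (hne : xs ≠ []) :
    maxRunAlt xs = lineVal xs := by
  induction hn : xs.length using Nat.strong_induction_on generalizing xs with
  | _ n ih =>
    cases xs with
    | nil => exact absurd rfl hne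
    | cons x rest =>
      have hsplit := pairsFold_cons x rest 1 1 le_rfl le_rfl
      rw [maxRunAlt]
      set k := runLen x rest with hk
      rcases hys : rest.drop k with _ | ⟨y, t⟩
      · rw [lineVal, hsplit, if_pos hys]
        simp only [maxRunAlt]
        rw [max_eq_left (by push_cast; omega), max_eq_right (by omega)]
        push_cast; ring
      · have hysne : rest.drop k ≠ [] := by rw [hys]; simp
        rw [lineVal, hsplit, if_neg hysne]
        have h1k : max (1 : Int) (1 + (k : Int)) = max (1 + (k : Int)) 1 := max_comm _ _
        rw [h1k, pairsFold, pairsFoldl_max_split, ← pairsFold, ← lineVal]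
        have hlt : (rest.drop k).length < n := by
          rw [← hn]; simp only [List.length_drop, List.length_cons]; omega
        rw [← hys, ih _ hlt (rest.drop k) hysne rfl]
        push_cast
        ring_nf

-- the clamped n-by-n board, and its row i and column i, as lists
def gridL (arr : List (List String)) : List (List String) :=
  arr.map (fun row => row.take arr.length)
def rowL (arr : List (List String)) (i : Nat) : List String := (gridL arr).getD i []
def colL (arr : List (List String)) (i : Nat) : List String := (gridL arr).map (fun r => r.getD i "")

theorem getD_take {α : Type} (l : List α) (n k : Nat) (d : α) (h : k < n) :
    (l.take n).getD k d = l.getD k d := by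
  simp [List.getD, h]

theorem pairsFold_start (xs : List String) (a : Int) (ha : 1 ≤ a) :
    (pairsFold xs (a, 1)).1 = max a (lineVal xs) := by
  have h : (a, (1:Int)) = (max a 1, 1) := by rw [max_eq_left ha]
  rw [h, pairsFold, pairsFoldl_max_split]
  rfl

theorem rowL_eq (arr : List (List String)) (i : Nat) (h : i < arr.length) :
    rowL arr i = (arr.getD i []).take arr.length := by
  rw [rowL, gridL, List.getD_eq_getElem _ _ (by simpa using h), List.getElem_map,
    List.getD_eq_getElem _ _ h]

theorem rowL_len (arr : List (List String)) (i : Nat)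
    (hpre : ∀ row ∈ arr, arr.length ≤ row.length)
    (h : i < arr.length) : (rowL arr i).length = arr.length := by
  rw [rowL_eq arr i h, List.length_take]
  have hmem : arr.getD i [] ∈ arr := by
    rw [List.getD_eq_getElem _ _ h]; exact List.getElem_mem _
  have := hpre _ hmem
  omega

theorem foldl_max_map_range {α : Type} (l : List α) (f : α → Int) (d : α) (a : Int) :
    (l.map f).foldl max a
    = (List.range l.length).foldl (fun acc i => max acc (f (l.getD i d))) a := by
  induction l generalizing a with
  | nil => simp
  | cons x t ih =>
    simp only [List.map_cons, List.foldl_cons, List.length_cons, List.range_succ_eq_map,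
      List.foldl_map, List.getD_cons_zero, List.getD_cons_succ, Nat.succ_eq_add_one]
    have h := ih (max a (f x))
    rw [List.foldl_map] at h
    exact h

theorem foldl_max_pull (l : List Nat) (u : Nat → Int) (b c : Int) :
    l.foldl (fun a i => max a (u i)) (max b c)
    = max (l.foldl (fun a i => max a (u i)) b) c := by
  induction l generalizing b with
  | nil => rfl
  | cons i t ih =>
    simp only [List.foldl_cons]
    rw [max_right_comm]
    exact ih _

theorem foldl_max_interchange (l : List Nat) (v w : Nat → Int) (a : Int) :
    l.foldl (fun a i => max a (max (v i) (w i))) a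
    = l.foldl (fun a i => max a (w i)) (l.foldl (fun a i => max a (v i)) a) := by
  induction l generalizing a with
  | nil => rfl
  | cons i t ih =>
    simp only [List.foldl_cons]
    rw [← max_assoc, foldl_max_pull t _ (max a (v i)) (w i), ih (max a (v i)),
      ← foldl_max_pull t w _ (w i)]

theorem outer_eq (arr : List (List String)) (hpre : ∀ row ∈ arr, arr.length ≤ row.length)
    (l : List Nat) (a : Int)
    (ha : 1 ≤ a) (hl : ∀ i ∈ l, i < arr.length) :
    l.foldl (fun answer (i : Nat) =>
      (let st1 := (PySem.List.pyRange 1 (arr.length : Int) 1).foldl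
          (fun st j => stepA st (pyCell arr i (j-1)) (pyCell arr i j)) (answer, 1)
       let st2 := (PySem.List.pyRange 1 (arr.length : Int) 1).foldl
          (fun st j => stepA st (pyCell arr (j-1) i) (pyCell arr j i)) (st1.1, 1)
       st2.1)) a
    = l.foldl (fun answer i => max answer (max (lineVal (rowL arr i)) (lineVal (colL arr i)))) a := by
  induction l generalizing a with
  | nil => rfl
  | cons i t ih =>
    have hi : i < arr.length := hl i List.mem_cons_self
    have hrowlen : (rowL arr i).length = arr.length := rowL_len arr i hpre hi
    have hcollen : (colL arr i).length = arr.length := by simp [colL, gridL]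
    have hrow := foldl_pyRange_adj (rowL arr i) (pyCell arr i) (a, 1)
      (by
        intro k hk
        rw [hrowlen] at hk
        rw [rowL_eq arr i hi, getD_take _ _ _ _ hk]
        simp [pyCell])
    rw [hrowlen] at hrow
    have hcol := foldl_pyRange_adj (colL arr i) (fun j => pyCell arr j i)
      ((pairsFold (rowL arr i) (a, 1)).1, 1)
      (by
        intro k hk
        rw [hcollen] at hk
        rw [colL, List.getD_eq_getElem _ _ (by simpa [gridL] using hk), List.getElem_map]
        simp only [gridL, List.getElem_map]
        rw [getD_take _ _ _ _ hi]
        simp [pyCell, List.getD, List.getElem?_eq_getElem hk])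
    rw [hcollen] at hcol
    beta_reduce at hcol
    simp only [List.foldl_cons]
    rw [hrow, hcol, pairsFold_start _ _ ha,
      pairsFold_start _ _ (le_trans ha (le_max_left _ _)), max_assoc]
    exact ih _ (le_trans ha (le_max_left _ _)) (fun j hj => hl j (List.mem_cons_of_mem _ hj))

-- main equality on grids with ≥ 2 rows whose rows all have length ≥ len(arr)
theorem main_eq (arr : List (List String)) (h2 : 2 ≤ arr.length)
    (hpre : ∀ row ∈ arr, arr.length ≤ row.length) : check arr = check_alt arr := by
  have hn1 : 1 ≤ arr.length := by omega
  -- A side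
  simp only [check]
  rw [PySem.List.pyRange_one 0 (arr.length : Int)]
  have htn : ((arr.length : Int) - 0).toNat = arr.length := by omega
  rw [htn, List.foldl_map]
  rw [List.foldl_ext _
    (fun (answer : Int) (i : Nat) =>
      (let st1 := (PySem.List.pyRange 1 (arr.length : Int) 1).foldl
          (fun st j => stepA st (pyCell arr i (j-1)) (pyCell arr i j)) (answer, 1)
       let st2 := (PySem.List.pyRange 1 (arr.length : Int) 1).foldl
          (fun st j => stepA st (pyCell arr (j-1) i) (pyCell arr j i)) (st1.1, 1)
       st2.1)) 1
    (by intro b k hk; dsimp only; norm_num)]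
  rw [outer_eq arr hpre (List.range arr.length) 1 le_rfl
    (by intro i hi; exact List.mem_range.mp hi)]
  rw [foldl_max_interchange]
  -- B side
  simp only [check_alt, PySem.List.slice_to_natCast]
  rw [if_neg (by omega)]
  have hg : arr.map (fun row => row.take arr.length) = gridL arr := rfl
  rw [hg]
  rw [PySem.List.pyRange_one 0 (arr.length : Int), htn, List.map_map]
  rw [List.map_append, List.foldl_append, List.map_map, List.foldl_map,
    foldl_max_map_range (gridL arr) maxRunAlt []]
  have hlg : (gridL arr).length = arr.length := by simp [gridL]
  rw [hlg]
  simp only [Function.comp]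
  have hextRow : ∀ (a : Int),
      (List.range arr.length).foldl
        (fun acc i => max acc (maxRunAlt ((gridL arr).getD i []))) a
      = (List.range arr.length).foldl
        (fun acc i => max acc (lineVal (rowL arr i))) a := by
    intro a
    refine List.foldl_ext _ _ a ?_
    intro b i hi
    have hi' : i < arr.length := List.mem_range.mp hi
    show max b (maxRunAlt (rowL arr i)) = max b (lineVal (rowL arr i))
    rw [maxRunAlt_eq_lineVal (rowL arr i)
      (by
        intro hnil
        have h0 := rowL_len arr i hpre hi'
        rw [hnil] at h0
        simp at h0
        omega)]
  have hextCol : ∀ (a : Int),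
      (List.range arr.length).foldl
        (fun (x : Int) (y : Nat) => max x (maxRunAlt (List.map (fun row => PySem.List.pyGetD row (0 + (y : Int)) "") (gridL arr)))) a
      = (List.range arr.length).foldl
        (fun acc j => max acc (lineVal (colL arr j))) a := by
    intro a
    refine List.foldl_ext _ _ a ?_
    intro b j hj
    dsimp only
    rw [zero_add]
    simp only [PySem.List.pyGetD_natCast]
    show max b (maxRunAlt (colL arr j)) = max b (lineVal (colL arr j))
    rw [maxRunAlt_eq_lineVal (colL arr j) (by
      cases arr with
      | nil => simp at h2
      | cons r t => simp [colL, gridL])]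
  rw [hextRow, hextCol]

-- on a single-row board A's inner loops run zero times and it returns 1
theorem check_singleton (r : List String) : check [r] = 1 := by
  norm_num [check, PySem.List.pyRange_one]

-- ===== VERDICT (by name: the statement is the Claim_ definition above) =====
theorem check_spec : Claim_equal_check := by
  intro arr _ hpre
  show check arr = check_alt arr
  cases arr with
  | nil => decide
  | cons r t =>
    cases t with
    | nil =>
      rw [check_singleton r]
      simp [check_alt]
    | cons r2 t2 =>
      have hall : ∀ row ∈ r :: r2 :: t2, (r :: r2 :: t2).length ≤ row.length := by
        rcases hpre with h1 | h2
        · simp at h1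
        · exact h2
      exact main_eq _ (by simp) hall
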